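-- pv_equiv track=rewrite | github.com/xeqbz/IGI | IGI/LR3/Tasks/Task5.py | find_sum_before_last_positive
-- ===== SOURCE A (Python) =====
-- def find_sum_before_last_positive(numbers: list):
--     last_positive_index = 0
--     for i in range(len(numbers)):
--         if numbers[i] > 0:
--             last_positive_index = i
--     sum_last_positive = 0
--     for i in range(last_positive_index):
--         sum_last_positive += numbers[i]
--     return sum_last_positive
-- ===== SOURCE B (Python) =====
-- def find_sum_before_last_positive(numbers: list):
--     running_sum = 0
--     answer = 0
--     for x in numbers:
--         if x > 0:
--             answer = running_sum
--         running_sum += x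
--     return answer
-- ===== Notes on version B (the rewrite author's own statement) =====
-- stated objective: simpler
-- what changed: Replaces A's two index loops (find last positive index, then re-sum the prefix) by a single pass over the values that records the running prefix sum whenever a positive element is seen.
import Mathlib
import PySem

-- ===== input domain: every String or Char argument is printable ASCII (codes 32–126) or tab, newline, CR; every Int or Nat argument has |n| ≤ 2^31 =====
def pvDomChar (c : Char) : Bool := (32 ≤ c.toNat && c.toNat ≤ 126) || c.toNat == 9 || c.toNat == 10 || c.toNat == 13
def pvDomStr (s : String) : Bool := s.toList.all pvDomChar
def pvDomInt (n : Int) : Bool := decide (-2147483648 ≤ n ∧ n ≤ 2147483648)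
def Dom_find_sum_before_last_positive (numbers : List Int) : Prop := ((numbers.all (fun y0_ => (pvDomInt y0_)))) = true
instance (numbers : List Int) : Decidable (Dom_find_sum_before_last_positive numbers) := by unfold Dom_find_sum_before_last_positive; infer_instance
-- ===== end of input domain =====

-- B replaces A's two index loops (find the last positive index, then re-sum that prefix)
-- by a single value pass carrying a running prefix sum; objective: simpler.

-- ===== PORT A =====
def find_sum_before_last_positive (numbers : List Int) : Int :=
  let last_positive_index : Int :=
    (PySem.List.pyRange 0 (PySem.List.len numbers) 1).foldl
      (fun lpi i => if PySem.List.pyGetD numbers i 0 > 0 then i else lpi) 0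
  (PySem.List.pyRange 0 last_positive_index 1).foldl
    (fun s i => s + PySem.List.pyGetD numbers i 0) 0

-- ===== PORT B =====
def find_sum_before_last_positive_alt (numbers : List Int) : Int :=
  (numbers.foldl
    (fun (st : Int × Int) x => (st.1 + x, if x > 0 then st.1 else st.2))
    (0, 0)).2

-- ===== PRECONDITION & SPEC =====
def Spec_find_sum_before_last_positive (numbers : List Int) (out : Int) : Prop := out = find_sum_before_last_positive_alt numbers
instance (numbers : List Int) (out : Int) : Decidable (Spec_find_sum_before_last_positive numbers out) := by unfold Spec_find_sum_before_last_positive; infer_instance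

-- ===== CLAIM (what is proved, stated in full; the proofs are below) =====
def Claim_equal_find_sum_before_last_positive : Prop := ∀ (numbers : List Int), Dom_find_sum_before_last_positive numbers → Spec_find_sum_before_last_positive numbers (find_sum_before_last_positive numbers)

-- ===== LEMMAS AND PROOFS =====

-- A's first loop (last positive index) as a named function
def pvLi (xs : List Int) : Int :=
  (PySem.List.pyRange 0 (PySem.List.len xs) 1).foldl
    (fun lpi i => if PySem.List.pyGetD xs i 0 > 0 then i else lpi) 0

-- A's second loop (prefix sum up to k) as a named function
def pvSum (xs : List Int) (k : Int) : Int :=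
  (PySem.List.pyRange 0 k 1).foldl (fun s i => s + PySem.List.pyGetD xs i 0) 0

theorem find_A_eq (xs : List Int) :
    find_sum_before_last_positive xs = pvSum xs (pvLi xs) := rfl

-- the last-positive-index fold stays within [0, n]
theorem pvLi_fold_bound (l : List Int) (n : Int) (f : Int → Int → Int)
    (hf : ∀ a i, f a i = a ∨ f a i = i)
    (hl : ∀ i ∈ l, 0 ≤ i ∧ i < n) :
    ∀ init : Int, 0 ≤ init → init ≤ n → 0 ≤ l.foldl f init ∧ l.foldl f init ≤ n := by
  induction l with
  | nil => intro init h0 h1; exact ⟨h0, h1⟩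
  | cons x t ih =>
    intro init h0 h1
    have hx := hl x (by simp)
    refine ih (fun i hi => hl i (by simp [hi])) (f init x) ?_ ?_ <;>
      rcases hf init x with h | h <;> simp [h] <;> omega

theorem pvLi_bound (xs : List Int) : 0 ≤ pvLi xs ∧ pvLi xs ≤ (xs.length : Int) := by
  unfold pvLi
  refine pvLi_fold_bound _ (xs.length : Int) _ ?_ ?_ 0 le_rfl (Int.natCast_nonneg _)
  · intro a i; by_cases h : PySem.List.pyGetD xs i 0 > 0 <;> simp [h]
  · intro i hi
    have := (PySem.List.mem_pyRange_one).1 (by simpa using hi)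
    simpa using this

-- indexing a prefix is unchanged by appending
theorem pyGetD_append_left (xs : List Int) (x : Int) (i : Int)
    (h0 : 0 ≤ i) (h1 : i < (xs.length : Int)) :
    PySem.List.pyGetD (xs ++ [x]) i 0 = PySem.List.pyGetD xs i 0 := by
  rw [PySem.List.pyGetD_eq_getElem (xs ++ [x]) 0 h0 (by simp; omega),
      PySem.List.pyGetD_eq_getElem xs 0 h0 (by simpa using h1)]
  rw [List.getElem_append_left (by omega)]

theorem foldl_ext_mem {α β : Type} (l : List β) (f g : α → β → α)
    (h : ∀ a b, b ∈ l → f a b = g a b) :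
    ∀ init, l.foldl f init = l.foldl g init := by
  induction l with
  | nil => intro init; rfl
  | cons x t ih =>
    intro init
    simp only [List.foldl_cons, h init x (by simp)]
    exact ih (fun a b hb => h a b (by simp [hb])) _

theorem pvSum_append (xs : List Int) (x : Int) (k : Int) (hk : k ≤ (xs.length : Int)) :
    pvSum (xs ++ [x]) k = pvSum xs k := by
  unfold pvSum
  refine foldl_ext_mem _ _ _ ?_ 0
  intro a i hi
  have := (PySem.List.mem_pyRange_one).1 hi
  rw [pyGetD_append_left xs x i this.1 (by omega)]

theorem pvLi_append (xs : List Int) (x : Int) :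
    pvLi (xs ++ [x]) = if x > 0 then (xs.length : Int) else pvLi xs := by
  have hlast : PySem.List.pyGetD (xs ++ [x]) (xs.length : Int) 0 = x := by
    rw [PySem.List.pyGetD_eq_getElem (xs ++ [x]) 0 (Int.natCast_nonneg _) (by simp)]
    simp
  have hinner :
      (PySem.List.pyRange 0 (xs.length : Int) 1).foldl
        (fun lpi i => if PySem.List.pyGetD (xs ++ [x]) i 0 > 0 then i else lpi) 0
      = (PySem.List.pyRange 0 (xs.length : Int) 1).foldl
        (fun lpi i => if PySem.List.pyGetD xs i 0 > 0 then i else lpi) 0 := by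
    refine foldl_ext_mem _ _ _ ?_ 0
    intro a i hi
    have := (PySem.List.mem_pyRange_one).1 hi
    rw [pyGetD_append_left xs x i this.1 this.2]
  unfold pvLi
  simp only [PySem.List.len_eq, List.length_append, List.length_cons, List.length_nil]
  have hcast : ((xs.length + (0 + 1) : Nat) : Int) = (xs.length : Int) + 1 := by push_cast; ring
  rw [hcast, PySem.List.pyRange_one_succ_right (Int.natCast_nonneg _), List.foldl_append]
  simp only [List.foldl_cons, List.foldl_nil, hlast, hinner]

theorem pvSum_full (xs : List Int) : pvSum xs (xs.length : Int) = xs.sum := by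
  unfold pvSum
  rw [PySem.List.foldl_pyRange_zero_pyGetD' xs 0 (fun s v => s + v) 0]
  induction xs using List.reverseRecOn with
  | nil => rfl
  | append_singleton t x ih => simp [ih]

-- B's running-sum component is the list sum
theorem alt_fold_fst (xs : List Int) : ∀ st : Int × Int,
    (xs.foldl (fun (st : Int × Int) x => (st.1 + x, if x > 0 then st.1 else st.2)) st).1
      = st.1 + xs.sum := by
  induction xs with
  | nil => intro st; simp
  | cons x t ih => intro st; simp [ih]; ring

theorem A_eq_alt (xs : List Int) :
    find_sum_before_last_positive xs = find_sum_before_last_positive_alt xs := by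
  induction xs using List.reverseRecOn with
  | nil => rfl
  | append_singleton t x ih =>
    rw [find_A_eq, pvLi_append]
    unfold find_sum_before_last_positive_alt
    rw [List.foldl_append]
    simp only [List.foldl_cons, List.foldl_nil]
    by_cases hx : x > 0
    · simp only [hx, if_pos]
      rw [pvSum_append t x _ le_rfl, pvSum_full, alt_fold_fst t (0,0)]
      simp
    · simp only [hx, if_false]
      rw [pvSum_append t x _ (pvLi_bound t).2, ← find_A_eq, ih]
      rfl

-- ===== VERDICT (by name: the statement is the Claim_ definition above) =====
theorem find_sum_before_last_positive_spec : Claim_equal_find_sum_before_last_positive := by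
  intro numbers _
  exact A_eq_alt numbers
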